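-- pv_equiv track=rewrite | github.com/jfpio/ConnectFour | ConnectFourGame/model/ai/get_valid_moves.py | get_order_for_odd
-- ===== SOURCE A (Python) =====
-- def get_order_for_odd(board):
--     columns_number = len(board[0])
--     middle = int(columns_number / 2)
--     order = []
--
--     for i in range(middle + 1):
--         if i == 0:
--             order.append(middle)
--         else:
--             order.append(middle - i)
--             order.append(middle + i)
--     return order
-- ===== SOURCE B (Python) =====
-- def get_order_for_odd(board):
--     middle = len(board[0]) // 2
--     # rank: center 0, then for each distance d the left column (2d-1) before the right (2d)
--     return sorted(range(2 * middle + 1), key=lambda c: 2 * abs(c - middle) - (c < middle))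
-- ===== Notes on version B (the rewrite author's own statement) =====
-- stated objective: idiomatic
-- what changed: Replaces the hand-rolled interleaving loop with generate-all-then-sort: build range(2*middle+1) and sort it by the closed-form rank 2*abs(c-middle)-(c<middle), which puts the center first and, per distance band, the left column before the right one.
import Mathlib
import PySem

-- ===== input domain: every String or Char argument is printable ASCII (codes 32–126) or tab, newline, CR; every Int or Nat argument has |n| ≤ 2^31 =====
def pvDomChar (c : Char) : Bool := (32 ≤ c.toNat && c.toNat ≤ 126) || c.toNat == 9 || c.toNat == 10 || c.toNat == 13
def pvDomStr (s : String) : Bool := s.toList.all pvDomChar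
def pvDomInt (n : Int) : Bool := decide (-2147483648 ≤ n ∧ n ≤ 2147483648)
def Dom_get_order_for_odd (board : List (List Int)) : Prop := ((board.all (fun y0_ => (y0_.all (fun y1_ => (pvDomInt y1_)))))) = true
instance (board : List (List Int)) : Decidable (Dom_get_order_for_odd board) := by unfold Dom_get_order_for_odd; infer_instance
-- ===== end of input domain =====

-- B replaces A's hand-rolled interleaving loop with generate-all-then-sort by a closed-form
-- rank (objective: idiomatic). Equivalence is about the return value; neither version mutates.

-- ===== PORT A =====
def get_order_for_odd (board : List (List Int)) : List Int :=
  match PySem.List.pyGet? board 0 with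
  | none => []        -- board[0] raises IndexError; excluded by Pre_
  | some row =>
    let columns_number : Int := row.length
    -- int(columns_number / 2): exact floor division since columns_number ≥ 0 (and small, so the float is exact)
    let middle : Int := PySem.Int.floordiv columns_number 2
    (PySem.List.pyRange 0 (middle + 1) 1).foldl
      (fun order i =>
        if i == 0 then order ++ [middle]
        else order ++ [middle - i] ++ [middle + i]) []

-- ===== PORT B =====
def get_order_for_odd_alt (board : List (List Int)) : List Int :=
  match PySem.List.pyGet? board 0 with
  | none => []        -- board[0] raises IndexError; excluded by Pre_
  | some row =>
    let middle : Int := PySem.Int.floordiv (row.length : Int) 2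
    PySem.List.sorted (PySem.List.pyRange 0 (2 * middle + 1) 1)
      (fun c => 2 * |c - middle| - (if c < middle then 1 else 0)) false

-- ===== PRECONDITION & SPEC =====
-- Pre_ excludes only the empty board, on which both Pythons raise IndexError at board[0].
def Pre_get_order_for_odd (board : List (List Int)) : Prop := board ≠ []
instance (board : List (List Int)) : Decidable (Pre_get_order_for_odd board) := by
  unfold Pre_get_order_for_odd; infer_instance

def pvWitness_get_order_for_odd : List (List Int) := [[1, 2, 3]]

def Spec_get_order_for_odd (board : List (List Int)) (out : List Int) : Prop := out = get_order_for_odd_alt board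
instance (board : List (List Int)) (out : List Int) : Decidable (Spec_get_order_for_odd board out) := by unfold Spec_get_order_for_odd; infer_instance

-- ===== CLAIM (what is proved, stated in full; the proofs are below) =====
def Claim_equal_get_order_for_odd : Prop := ∀ (board : List (List Int)), Dom_get_order_for_odd board → Pre_get_order_for_odd board → Spec_get_order_for_odd board (get_order_for_odd board)

-- ===== LEMMAS AND PROOFS =====

-- The common target list: center c, then per distance i+1 the pair (c-(i+1), c+(i+1)).
def pvTarget (c : Int) (k : Nat) : List Int :=
  c :: (List.range k).flatMap (fun i => [c - ((i : Int) + 1), c + ((i : Int) + 1)])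

theorem pvTarget_succ (c : Int) (k : Nat) :
    pvTarget c (k + 1) = pvTarget c k ++ [c - ((k : Int) + 1), c + ((k : Int) + 1)] := by
  simp [pvTarget, List.range_succ]

-- A's loop computes pvTarget.
theorem pvLoopA (c : Int) (k : Nat) :
    (PySem.List.pyRange 0 ((k : Int) + 1) 1).foldl
      (fun order i =>
        if i == 0 then order ++ [c]
        else order ++ [c - i] ++ [c + i]) [] = pvTarget c k := by
  induction k with
  | zero =>
    rw [show ((0 : Nat) : Int) + 1 = 0 + 1 by norm_num, PySem.List.pyRange_one_singleton]
    simp [pvTarget]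
  | succ k ih =>
    rw [show ((k + 1 : Nat) : Int) + 1 = ((k : Int) + 1) + 1 by push_cast; ring,
        PySem.List.pyRange_one_succ_right (by positivity), List.foldl_append, ih,
        pvTarget_succ]
    simp only [List.foldl_cons, List.foldl_nil]
    rw [if_neg (by simp only [beq_iff_eq]; omega)]
    simp [List.append_assoc]

-- pvTarget is a permutation of the contiguous range of columns.
theorem pvTarget_perm (c : Int) (k : Nat) :
    (pvTarget c k).Perm (PySem.List.pyRange (c - k) (c + k + 1) 1) := by
  induction k with
  | zero =>
    rw [show c - (0 : Nat) = c by norm_num, show c + (0 : Nat) + 1 = c + 1 by norm_num,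
        PySem.List.pyRange_one_singleton]
    simp [pvTarget]
  | succ k ih =>
    have hsplit : PySem.List.pyRange (c - (k + 1 : Nat)) (c + (k + 1 : Nat) + 1) 1
        = (c - ((k : Int) + 1)) :: (PySem.List.pyRange (c - k) (c + k + 1) 1 ++ [c + (k : Int) + 1]) := by
      rw [show c - ((k + 1 : Nat) : Int) = c - ((k : Int) + 1) by push_cast; ring]
      rw [PySem.List.pyRange_one_cons (by push_cast; omega)]
      rw [show c - ((k : Int) + 1) + 1 = c - (k : Int) by ring]
      rw [show c + ((k + 1 : Nat) : Int) + 1 = (c + (k : Int) + 1) + 1 by push_cast; ring]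
      rw [PySem.List.pyRange_one_succ_right (by omega)]
    rw [hsplit, pvTarget_succ, show c + ((k : Int) + 1) = c + (k : Int) + 1 from by ring]
    refine List.Perm.trans (l₂ := (c - ((k : Int) + 1)) :: (pvTarget c k ++ [c + (k : Int) + 1])) ?_ ?_
    · exact List.perm_middle
    · exact List.Perm.cons _ (ih.append (List.Perm.refl _))

-- The rank key evaluated along pvTarget is 0, 1, …, 2k in order.
theorem pvTarget_map_key (c : Int) (k : Nat) :
    (pvTarget c k).map (fun x => 2 * |x - c| - (if x < c then 1 else 0))
      = PySem.List.pyRange 0 (2 * (k : Int) + 1) 1 := by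
  induction k with
  | zero =>
    rw [show 2 * ((0 : Nat) : Int) + 1 = 0 + 1 by norm_num, PySem.List.pyRange_one_singleton]
    simp [pvTarget]
  | succ k ih =>
    rw [pvTarget_succ, List.map_append, ih]
    conv_rhs =>
      rw [show 2 * ((k + 1 : Nat) : Int) + 1 = ((2 * (k : Int) + 1) + 1) + 1 by push_cast; ring]
      rw [PySem.List.pyRange_one_succ_right (by positivity)]
      rw [PySem.List.pyRange_one_succ_right (by positivity)]
    have h1 : (2 : Int) * |c - ((k : Int) + 1) - c| - (if c - ((k : Int) + 1) < c then 1 else 0)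
        = 2 * (k : Int) + 1 := by
      rw [show c - ((k : Int) + 1) - c = -((k : Int) + 1) by ring, abs_neg,
          abs_of_nonneg (by positivity), if_pos (by omega)]
      ring
    have h2 : (2 : Int) * |c + ((k : Int) + 1) - c| - (if c + ((k : Int) + 1) < c then 1 else 0)
        = 2 * (k : Int) + 1 + 1 := by
      rw [show c + ((k : Int) + 1) - c = (k : Int) + 1 by ring,
          abs_of_nonneg (by positivity), if_neg (by omega)]
      ring
    simp only [List.map_cons, List.map_nil, h1, h2]
    rw [List.append_assoc]
    rfl

-- Hence pvTarget is strictly increasing under the rank key.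
theorem pvTarget_pairwise (c : Int) (k : Nat) :
    (pvTarget c k).Pairwise (fun a b =>
      (fun x => 2 * |x - c| - (if x < c then 1 else 0)) a
        < (fun x => 2 * |x - c| - (if x < c then 1 else 0)) b) := by
  rw [← List.pairwise_map, pvTarget_map_key]
  exact PySem.List.pairwise_lt_pyRange_one 0 (2 * (k : Int) + 1)

-- Reduced forms of the two ports on a nonempty board.
theorem pvA_cons (row : List Int) (rest : List (List Int)) :
    get_order_for_odd (row :: rest)
      = (PySem.List.pyRange 0 (PySem.Int.floordiv (row.length : Int) 2 + 1) 1).foldl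
          (fun order i =>
            if i == 0 then order ++ [PySem.Int.floordiv (row.length : Int) 2]
            else order ++ [PySem.Int.floordiv (row.length : Int) 2 - i]
                       ++ [PySem.Int.floordiv (row.length : Int) 2 + i]) [] := by
  simp [get_order_for_odd, PySem.List.pyGet?, PySem.List.pyIdx?]

theorem pvB_cons (row : List Int) (rest : List (List Int)) :
    get_order_for_odd_alt (row :: rest)
      = PySem.List.sorted
          (PySem.List.pyRange 0 (2 * PySem.Int.floordiv (row.length : Int) 2 + 1) 1)
          (fun c => 2 * |c - PySem.Int.floordiv (row.length : Int) 2|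
                      - (if c < PySem.Int.floordiv (row.length : Int) 2 then 1 else 0)) false := by
  simp [get_order_for_odd_alt, PySem.List.pyGet?, PySem.List.pyIdx?]

-- ===== VERDICT (by name: the statement is the Claim_ definition above) =====
theorem get_order_for_odd_spec : Claim_equal_get_order_for_odd := by
  intro board _ hpre
  obtain ⟨row, rest, rfl⟩ : ∃ r t, board = r :: t := by
    cases board with
    | nil => exact absurd rfl hpre
    | cons r t => exact ⟨r, t, rfl⟩
  unfold Spec_get_order_for_odd
  rw [pvA_cons, pvB_cons]
  set c : Int := PySem.Int.floordiv (row.length : Int) 2 with hc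
  have hc0 : 0 ≤ c := Int.fdiv_nonneg (by positivity) (by norm_num)
  have hk : c = ((c.toNat : Nat) : Int) := (Int.toNat_of_nonneg hc0).symm
  rw [hk]
  have hperm : (pvTarget ((c.toNat : Nat) : Int) c.toNat).Perm
      (PySem.List.pyRange 0 (2 * ((c.toNat : Nat) : Int) + 1) 1) := by
    have := pvTarget_perm ((c.toNat : Nat) : Int) c.toNat
    rwa [show ((c.toNat : Nat) : Int) - ((c.toNat : Nat) : Int) = 0 by ring,
         show ((c.toNat : Nat) : Int) + ((c.toNat : Nat) : Int) + 1
            = 2 * ((c.toNat : Nat) : Int) + 1 by ring] at this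
  rw [PySem.List.sorted_eq_of_perm_of_pairwise_lt _ (pvTarget ((c.toNat : Nat) : Int) c.toNat) _
        hperm (pvTarget_pairwise ((c.toNat : Nat) : Int) c.toNat)]
  exact pvLoopA ((c.toNat : Nat) : Int) c.toNat
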